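-- pv_equiv track=rewrite | github.com/YevhenNyzovyi/HillelSchool | 5 lesson/hw5.3.py | convert_to_hashtag
-- ===== SOURCE A (Python) =====
-- import string
--
-- def convert_to_hashtag(input_string):
--
--     cleaned_string = ""
--     for char in input_string:
--         if char not in string.punctuation:
--             cleaned_string += char
--
--     words = cleaned_string.split()
--     capitalized_words = []
--     for word in words:
--         if word:
--             capitalized_words.append(word.capitalize())
--
--     hashtag_content = "".join(capitalized_words)
--
--     final_hashtag = "#" + hashtag_content
--
--
--     if len(final_hashtag) > 140:
--         final_hashtag = final_hashtag[:140]
--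
--     return final_hashtag
-- ===== SOURCE B (Python) =====
-- import string
--
-- def convert_to_hashtag(input_string):
--     # single pass: skip punctuation, track word starts, case each kept char directly
--     out = []
--     at_word_start = True
--     for char in input_string:
--         if char in string.punctuation:
--             continue
--         if char.isspace():
--             at_word_start = True
--         else:
--             out.append(char.upper() if at_word_start else char.lower())
--             at_word_start = False
--     return ("#" + "".join(out))[:140]
-- ===== Notes on version B (the rewrite author's own statement) =====
-- stated objective: alternative
-- what changed: Replaces A's three passes (strip punctuation into a new string, split into words, capitalize each word and join) by a single character-level state machine that skips punctuation, tracks word starts on whitespace, and upper/lower-cases each kept character directly.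
import Mathlib
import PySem

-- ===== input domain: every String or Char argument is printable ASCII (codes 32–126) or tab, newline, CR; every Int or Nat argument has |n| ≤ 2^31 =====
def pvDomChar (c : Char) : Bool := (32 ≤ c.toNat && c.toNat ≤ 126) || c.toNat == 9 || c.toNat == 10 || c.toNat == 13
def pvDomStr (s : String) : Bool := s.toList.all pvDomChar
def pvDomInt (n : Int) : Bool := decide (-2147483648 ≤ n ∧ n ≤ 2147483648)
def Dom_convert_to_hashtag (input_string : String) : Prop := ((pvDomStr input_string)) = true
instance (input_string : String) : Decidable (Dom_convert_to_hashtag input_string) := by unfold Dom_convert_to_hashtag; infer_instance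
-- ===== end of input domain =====

-- B replaces A's three passes (filter punctuation, split into words, capitalize each) by one
-- state-machine pass over the characters; objective: alternative/simpler (one pass, no
-- intermediate word list).

-- string.punctuation (shared constant of both Pythons)
def pvPunct : List Char := "!\"#$%&'()*+,-./:;<=>?@[\\]^_`{|}~".toList

-- ===== PORT A =====
-- str.capitalize, exact on the ASCII domain Dom: first char uppercased, rest lowercased
def pyCapitalize (w : List Char) : List Char :=
  match w with
  | [] => []
  | c :: t => PySem.Chars.upperChar c :: PySem.Chars.lower t

def convert_to_hashtag (input_string : String) : String :=
  let cleaned := input_string.toList.foldl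
    (fun acc c => if pvPunct.contains c then acc else acc ++ [c]) []
  let words := PySem.Chars.split₀ cleaned
  let caps := words.foldl
    (fun acc w => if w.isEmpty then acc else acc ++ [pyCapitalize w]) ([] : List (List Char))
  let content := PySem.Chars.join [] caps
  let final := '#' :: content
  String.ofList (if 140 < final.length then PySem.List.slice final none (some 140) else final)

-- ===== PORT B =====
def hashStep (st : List Char × Bool) (c : Char) : List Char × Bool :=
  if pvPunct.contains c then st
  else if PySem.Chars.isspace c then (st.1, true)
  else (st.1 ++ [if st.2 then PySem.Chars.upperChar c else PySem.Chars.lowerChar c], false)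

def convert_to_hashtag_alt (input_string : String) : String :=
  let st := input_string.toList.foldl hashStep ([], true)
  String.ofList (PySem.List.slice ('#' :: st.1) none (some 140))

-- ===== PRECONDITION & SPEC =====
def Spec_convert_to_hashtag (input_string : String) (out : String) : Prop := out = convert_to_hashtag_alt input_string
instance (input_string : String) (out : String) : Decidable (Spec_convert_to_hashtag input_string out) := by unfold Spec_convert_to_hashtag; infer_instance

-- ===== CLAIM (what is proved, stated in full; the proofs are below) =====
def Claim_equal_convert_to_hashtag : Prop := ∀ (input_string : String), Dom_convert_to_hashtag input_string → Spec_convert_to_hashtag input_string (convert_to_hashtag input_string)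

-- ===== LEMMAS AND PROOFS =====

-- B's per-word step, once punctuation chars are gone
def step2 (st : List Char × Bool) (c : Char) : List Char × Bool :=
  if PySem.Chars.isspace c then (st.1, true)
  else (st.1 ++ [if st.2 then PySem.Chars.upperChar c else PySem.Chars.lowerChar c], false)

theorem foldl_hashStep_filter (cs : List Char) (st : List Char × Bool) :
    cs.foldl hashStep st = (cs.filter (fun c => !pvPunct.contains c)).foldl step2 st := by
  induction cs generalizing st with
  | nil => rfl
  | cons c rest ih =>
    by_cases h : pvPunct.contains c = true
    · rw [List.foldl_cons, List.filter_cons]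
      simp only [h, Bool.not_true, if_false, Bool.false_eq_true]
      rw [show hashStep st c = st from by simp only [hashStep, h, if_true], ih]
    · rw [List.foldl_cons, List.filter_cons]
      simp only [Bool.not_eq_true] at h
      simp only [h, Bool.not_false, if_true, List.foldl_cons]
      rw [show hashStep st c = step2 st c from by simp only [hashStep, step2, h, Bool.false_eq_true, if_false], ih]

theorem foldl_clean_filter (cs : List Char) (acc : List Char) :
    cs.foldl (fun acc c => if pvPunct.contains c then acc else acc ++ [c]) acc
      = acc ++ cs.filter (fun c => !pvPunct.contains c) := by
  induction cs generalizing acc with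
  | nil => simp
  | cons c rest ih =>
    rw [List.foldl_cons, List.filter_cons]
    by_cases h : pvPunct.contains c = true
    · simp only [h, Bool.not_true, if_true, Bool.false_eq_true, if_false]
      rw [ih]
    · simp only [Bool.not_eq_true] at h
      simp only [h, Bool.not_false, if_true, Bool.false_eq_true, if_false]
      rw [ih]
      simp

theorem foldl_caps_filter (ws : List (List Char)) (acc : List (List Char)) :
    ws.foldl (fun acc w => if w.isEmpty then acc else acc ++ [pyCapitalize w]) acc
      = acc ++ (ws.filter (fun w => !w.isEmpty)).map pyCapitalize := by
  induction ws generalizing acc with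
  | nil => simp
  | cons w rest ih =>
    rw [List.foldl_cons, List.filter_cons]
    by_cases h : w.isEmpty = true
    · simp only [h, Bool.not_true, if_true, Bool.false_eq_true, if_false]
      rw [ih]
    · simp only [Bool.not_eq_true] at h
      simp only [h, Bool.not_false, if_true, Bool.false_eq_true, if_false]
      rw [ih]
      simp

-- every word produced by split₀.go is nonempty (given nonempty accumulated words)
theorem split₀_go_nonempty (s : List Char) (cur : List Char) (acc : List (List Char))
    (hacc : ∀ w ∈ acc, w.isEmpty = false) :
    ∀ w ∈ PySem.Chars.split₀.go s cur acc, w.isEmpty = false := by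
  induction s generalizing cur acc with
  | nil =>
    intro w hw
    by_cases hc : cur.isEmpty
    · simp [PySem.Chars.split₀.go, hc] at hw
      exact hacc w hw
    · simp [PySem.Chars.split₀.go, hc] at hw
      rcases hw with hw | hw
      · exact hacc w hw
      · subst hw; simp_all [List.isEmpty_iff]
  | cons c rest ih =>
    intro w hw
    by_cases hs : PySem.Chars.isspace c
    · by_cases hc : cur.isEmpty
      · simp only [PySem.Chars.split₀.go, hs, hc, if_true] at hw
        exact ih [] acc hacc w hw
      · simp only [PySem.Chars.split₀.go, hs, hc, if_true] at hw
        refine ih [] (cur.reverse :: acc) ?_ w hw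
        intro v hv
        rcases List.mem_cons.mp hv with hv | hv
        · simp_all [List.isEmpty_iff]
        · exact hacc v hv
    · simp only [PySem.Chars.split₀.go, hs] at hw
      exact ih (c :: cur) acc hacc w hw

theorem flatten_intersperse_nil {α : Type} (l : List (List α)) :
    (List.intersperse ([] : List α) l).flatten = l.flatten := by
  induction l with
  | nil => rfl
  | cons x t ih =>
    cases t with
    | nil => rfl
    | cons y u => simpa [List.intersperse] using ih

theorem join_nil_flatten (l : List (List Char)) : PySem.Chars.join [] l = l.flatten := by
  simp [PySem.Chars.join, List.intercalate, flatten_intersperse_nil]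

theorem pyCapitalize_snoc (w : List Char) (c : Char) :
    pyCapitalize (w ++ [c]) =
      (if w.isEmpty then [PySem.Chars.upperChar c] else pyCapitalize w ++ [PySem.Chars.lowerChar c]) := by
  cases w with
  | nil => rfl
  | cons d t => simp [pyCapitalize, PySem.Chars.lower]

-- core invariant: B's remaining fold computes the capitalized concatenation of split₀.go
theorem core (s : List Char) (cur : List Char) (acc : List (List Char)) :
    (s.foldl step2 ((acc.reverse.map pyCapitalize).flatten ++ pyCapitalize cur.reverse, cur.isEmpty)).1
      = ((PySem.Chars.split₀.go s cur acc).map pyCapitalize).flatten := by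
  induction s generalizing cur acc with
  | nil =>
    by_cases hc : cur.isEmpty
    · have : cur = [] := List.isEmpty_iff.mp hc
      subst this
      simp [PySem.Chars.split₀.go, pyCapitalize]
    · simp [PySem.Chars.split₀.go, hc]
  | cons c rest ih =>
    by_cases hs : PySem.Chars.isspace c
    · by_cases hc : cur.isEmpty
      · have : cur = [] := List.isEmpty_iff.mp hc
        subst this
        simpa [PySem.Chars.split₀.go, hs, List.foldl, step2] using ih [] acc
      · have h2 := ih [] (cur.reverse :: acc)
        simp only [List.reverse_cons, List.map_append, List.flatten_append, List.map_nil,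
          List.reverse_nil, List.map_cons, List.flatten_cons, List.flatten_nil,
          List.append_nil, List.isEmpty_nil, pyCapitalize] at h2
        simp only [PySem.Chars.split₀.go, hs, hc, if_true, List.foldl, step2]
        simpa [pyCapitalize] using h2
    · have h2 := ih (c :: cur) acc
      simp only [List.reverse_cons] at h2
      rw [pyCapitalize_snoc] at h2
      simp only [PySem.Chars.split₀.go, hs, List.foldl, step2]
      by_cases hc : cur.isEmpty
      · have : cur = [] := List.isEmpty_iff.mp hc
        subst this
        simpa [pyCapitalize] using h2
      · have hcr : (cur.reverse).isEmpty = false := by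
          simp_all [List.isEmpty_iff]
        simp only [hcr, List.isEmpty_cons, if_false, Bool.false_eq_true] at h2 ⊢
        simp only [hc, if_false, Bool.false_eq_true] at h2 ⊢
        rw [← h2]
        simp
-- ===== VERDICT (by name: the statement is the Claim_ definition above) =====
theorem convert_to_hashtag_spec : Claim_equal_convert_to_hashtag := by
  intro input_string _
  unfold Spec_convert_to_hashtag convert_to_hashtag convert_to_hashtag_alt
  simp only [foldl_clean_filter, List.nil_append, foldl_caps_filter, foldl_hashStep_filter]
  set ds := input_string.toList.filter (fun c => !pvPunct.contains c) with hds
  have hwords : (PySem.Chars.split₀ ds).filter (fun w => !w.isEmpty) = PySem.Chars.split₀ ds := by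
    apply List.filter_eq_self.mpr
    intro w hw
    have := split₀_go_nonempty ds [] [] (by simp) w hw
    simp [this]
  have hcore := core ds [] []
  simp only [List.reverse_nil, List.map_nil, List.flatten_nil, List.nil_append, pyCapitalize,
    List.isEmpty_nil] at hcore
  have hcontent :
      PySem.Chars.join [] ((PySem.Chars.split₀ ds).filter (fun w => !w.isEmpty) |>.map pyCapitalize)
        = (ds.foldl step2 ([], true)).1 := by
    rw [hwords, join_nil_flatten, show PySem.Chars.split₀ ds = PySem.Chars.split₀.go ds [] [] from rfl]
    exact hcore.symm
  rw [hcontent]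
  set out := (ds.foldl step2 ([], true)).1
  by_cases h : 140 < ('#' :: out).length
  · have h' : 140 ≤ out.length := by simp at h; omega
    simp [h', PySem.List.slice_to ('#' :: out) (by norm_num : (0:Int) ≤ 140)]
  · simp only [h, if_false]
    rw [PySem.List.slice_to ('#' :: out) (by norm_num : (0:Int) ≤ 140)]
    rw [List.take_of_length_le (by omega)]
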